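-- pv_equiv track=rewrite | github.com/farukalpay/spectral-packet | src/spectral_packet_engine/database.py | _split_table_reference
-- ===== SOURCE A (Python) =====
-- def _split_table_reference(name: str) -> tuple[str | None, str]:
--     text = str(name).strip()
--     if not text:
--         raise ValueError("table name must not be empty")
--     parts = text.split(".")
--     if any(not part for part in parts):
--         raise ValueError(f"invalid table reference: {name!r}")
--     if len(parts) == 1:
--         return None, parts[0]
--     return ".".join(parts[:-1]), parts[-1]
-- ===== SOURCE B (Python) =====
-- def _split_table_reference(name: str) -> tuple[str | None, str]:
--     text = str(name).strip()
--     if not text: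
--         raise ValueError("table name must not be empty")
--     last = None          # index of the last '.' seen so far
--     seg = 0              # length of the current segment
--     for i, ch in enumerate(text):
--         if ch == ".":
--             if seg == 0:
--                 raise ValueError(f"invalid table reference: {name!r}")
--             last = i
--             seg = 0
--         else:
--             seg += 1
--     if seg == 0:
--         raise ValueError(f"invalid table reference: {name!r}")
--     if last is None:
--         return None, text
--     return text[:last], text[last + 1:]
-- ===== Notes on version B (the rewrite author's own statement) =====
-- stated objective: alternative
-- what changed: A stages split('.')-into-a-parts-list, an any(empty)-scan over it, and a '.'.join rejoin; B is a single left-to-right character scan with an accumulator (last-dot index, current-segment length) that validates empty segments inline and finishes with two slices at the recorded last dot, never materialising a parts list.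
import Mathlib
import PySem

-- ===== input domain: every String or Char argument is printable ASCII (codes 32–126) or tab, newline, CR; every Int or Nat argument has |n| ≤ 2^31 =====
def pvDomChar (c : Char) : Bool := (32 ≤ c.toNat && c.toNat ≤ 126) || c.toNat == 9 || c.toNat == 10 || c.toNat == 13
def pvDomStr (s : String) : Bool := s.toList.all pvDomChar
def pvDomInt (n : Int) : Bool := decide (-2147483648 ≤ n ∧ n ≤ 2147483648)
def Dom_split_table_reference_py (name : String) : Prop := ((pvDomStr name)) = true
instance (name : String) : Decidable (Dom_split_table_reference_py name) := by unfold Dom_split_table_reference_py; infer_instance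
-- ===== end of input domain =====

-- B replaces A's split-into-parts + any(empty)-scan + '.'.join rejoin with a single
-- character scan (last-dot index + current-segment-length accumulator) and two slices.

-- ===== PORT A =====
-- chars-level body of A (strings handled on List Char, per PySem convention)
def pvSplitA (cs : List Char) : Option String × String :=
  if cs.isEmpty then (none, "")  -- A raises ValueError here: outside Pre_
  else
    let parts := PySem.Chars.splitOn cs ['.']
    if parts.any List.isEmpty then (none, "")  -- A raises ValueError here: outside Pre_
    else if parts.length == 1 then (none, String.ofList (parts.headD []))
    else (some (String.ofList (PySem.Chars.join ['.'] parts.dropLast)), String.ofList (parts.getLastD []))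

def split_table_reference_py (name : String) : Option String × String :=
  pvSplitA (PySem.Str.strip name).toList

-- ===== PORT B =====
-- B's for-loop over enumerate(text): state = (index i, last-dot index, current segment
-- length); 'none' result = the ValueError raised inside the loop (outside Pre_).
def pvLoopB : List Char → Nat → Option Nat → Nat → Option (Option Nat × Nat)
  | [], _, last, seg => some (last, seg)
  | c :: rest, i, last, seg =>
    if c = '.' then
      if seg = 0 then none  -- raise ValueError: outside Pre_
      else pvLoopB rest (i + 1) (some i) 0
    else pvLoopB rest (i + 1) last (seg + 1)

def pvSplitB (cs : List Char) : Option String × String :=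
  if cs.isEmpty then (none, "")  -- B raises ValueError here: outside Pre_
  else
    match pvLoopB cs 0 none 0 with
    | none => (none, "")  -- B raises ValueError here: outside Pre_
    | some (last, seg) =>
      if seg = 0 then (none, "")  -- B raises ValueError here: outside Pre_
      else
        match last with
        | none => (none, String.ofList cs)
        -- text[:k] / text[k+1:] with 0 ≤ k < len text: Python slices = take/drop, exact here
        | some k => (some (String.ofList (cs.take k)), String.ofList (cs.drop (k + 1)))

def split_table_reference_py_alt (name : String) : Option String × String :=
  pvSplitB (PySem.Str.strip name).toList

-- ===== PRECONDITION & SPEC =====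
-- Pre_ excludes exactly the inputs on which A (and B) raise ValueError: a stripped-empty
-- name, or a reference with an empty dot-separated segment (before, between or after dots).
def Pre_split_table_reference_py (name : String) : Prop :=
  (PySem.Str.strip name).toList ≠ [] ∧
  PySem.Chars.startswith (PySem.Str.strip name).toList ['.'] = false ∧
  PySem.Chars.endswith (PySem.Str.strip name).toList ['.'] = false ∧
  PySem.Chars.isIn ['.', '.'] (PySem.Str.strip name).toList = false
instance (name : String) : Decidable (Pre_split_table_reference_py name) := by
  unfold Pre_split_table_reference_py; infer_instance

def pvWitness_split_table_reference_py : String := " db.schema.table "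

def Spec_split_table_reference_py (name : String) (out : Option String × String) : Prop := out = split_table_reference_py_alt name
instance (name : String) (out : Option String × String) : Decidable (Spec_split_table_reference_py name out) := by unfold Spec_split_table_reference_py; infer_instance

-- ===== CLAIM (what is proved, stated in full; the proofs are below) =====
def Claim_equal_split_table_reference_py : Prop := ∀ (name : String), Dom_split_table_reference_py name → Pre_split_table_reference_py name → Spec_split_table_reference_py name (split_table_reference_py name)

-- ===== LEMMAS AND PROOFS =====

theorem pvGo_zero (l cur : List Char) (acc : List (List Char)) :
    PySem.Chars.splitOn.go ['.'] 0 l cur acc = ((cur.reverse ++ l) :: acc).reverse := rfl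

theorem pvGo_nil (f : Nat) (cur : List Char) (acc : List (List Char)) :
    PySem.Chars.splitOn.go ['.'] (f + 1) [] cur acc = (cur.reverse :: acc).reverse := rfl

theorem pvGo_cons (f : Nat) (c : Char) (rest cur : List Char) (acc : List (List Char)) :
    PySem.Chars.splitOn.go ['.'] (f + 1) (c :: rest) cur acc =
      if List.isPrefixOf ['.'] (c :: rest) then
        PySem.Chars.splitOn.go ['.'] f rest [] (cur.reverse :: acc)
      else
        PySem.Chars.splitOn.go ['.'] f rest (c :: cur) acc := rfl

-- if dropWhile produced a cons, its head fails the predicate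
theorem pvDropWhileHead {p : Char → Bool} : ∀ {l t : List Char} {a : Char},
    l.dropWhile p = a :: t → p a = false := by
  intro l
  induction l with
  | nil => intro t a h; simp at h
  | cons x xs ih =>
    intro t a h
    rw [List.dropWhile_cons] at h
    split at h
    · exact ih h
    · cases h
      rename_i hx
      simpa using hx

-- PySem's fuel-based splitOn on a one-char separator is Mathlib's List.splitOn.
theorem pvSplitOn_go_eq (l : List Char) : ∀ (fuel : Nat) (cur : List Char) (acc : List (List Char)),
    l.length ≤ fuel →
    PySem.Chars.splitOn.go ['.'] fuel l cur acc
      = acc.reverse ++ List.modifyHead (cur.reverse ++ ·) (l.splitOn '.') := by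
  induction l with
  | nil =>
    intro fuel cur acc _
    cases fuel with
    | zero => simp [pvGo_zero, List.splitOn_nil, List.modifyHead]
    | succ f => simp [pvGo_nil, List.splitOn_nil, List.modifyHead]
  | cons c rest ih =>
    intro fuel cur acc hf
    cases fuel with
    | zero => simp at hf
    | succ f =>
      rw [pvGo_cons]
      have hf' : rest.length ≤ f := by simpa using hf
      by_cases hc : c = '.'
      · subst hc
        have hpre : List.isPrefixOf ['.'] ('.' :: rest) = true := by
          simp [List.isPrefixOf]
        rw [if_pos hpre, ih f [] (cur.reverse :: acc) hf']
        simp only [List.splitOn, List.splitOnP_cons, beq_self_eq_true, if_pos]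
        cases h : rest.splitOnP (· == '.') with
        | nil => exact absurd h (List.splitOnP_ne_nil _ rest)
        | cons a as => simp [List.modifyHead]
      · have hpre : List.isPrefixOf ['.'] (c :: rest) = false := by
          simp [List.isPrefixOf]
          exact fun h => (hc h.symm).elim
        rw [if_neg (by simp [hpre]), ih f (c :: cur) acc hf']
        simp only [List.splitOn, List.splitOnP_cons]
        have hcc : (c == '.') = false := by simp [hc]
        rw [hcc]
        simp only [Bool.false_eq_true, if_false]
        cases h : rest.splitOnP (· == '.') with
        | nil => exact absurd h (List.splitOnP_ne_nil _ rest)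
        | cons a as => simp [List.modifyHead]

theorem pvSplitOn_eq (cs : List Char) :
    PySem.Chars.splitOn cs ['.'] = cs.splitOn '.' := by
  rw [PySem.Chars.splitOn, pvSplitOn_go_eq cs (cs.length + 1) [] [] (by omega)]
  cases h : cs.splitOn '.' with
  | nil => simp
  | cons a as => simp [List.modifyHead]

-- splitting at a separator occurrence distributes
theorem pvSplitOn_append (xs ys : List Char) :
    (xs ++ '.' :: ys).splitOn '.' = xs.splitOn '.' ++ ys.splitOn '.' := by
  induction xs with
  | nil => simp [List.splitOn, List.splitOnP_cons]
  | cons a xs ih =>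
    simp only [List.cons_append, List.splitOn, List.splitOnP_cons] at ih ⊢
    by_cases ha : a = '.'
    · simp [ha, ih]
    · have hcc : (a == '.') = false := by simp [ha]
      rw [hcc]
      simp only [Bool.false_eq_true, if_false, ih]
      cases h : xs.splitOnP (· == '.') with
      | nil => exact absurd h (List.splitOnP_ne_nil _ xs)
      | cons b bs => simp [List.modifyHead]

theorem pvSplitOn_no_dot (ys : List Char) (h : '.' ∉ ys) : ys.splitOn '.' = [ys] := by
  simpa [List.splitOn] using List.splitOnP_eq_single (· == '.') ys (by
    intro x hx
    simp only [beq_iff_eq]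
    exact fun he => h (he ▸ hx))

-- under the three substring conditions every segment of splitOn is nonempty
theorem pvParts_ne_nil : ∀ (n : Nat) (cs : List Char), cs.length ≤ n → cs ≠ [] →
    ¬ (['.'] <+: cs) → ¬ (['.'] <:+ cs) → ¬ (['.', '.'] <:+: cs) →
    ∀ p ∈ cs.splitOn '.', p ≠ [] := by
  intro n
  induction n with
  | zero =>
    intro cs hlen hne _ _ _
    cases cs with
    | nil => exact absurd rfl hne
    | cons a l => simp at hlen
  | succ m ih =>
    intro cs hlen hne hpre hsuf hinf p hp
    by_cases hdot : '.' ∈ cs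
    · -- split at the FIRST dot: cs = xs ++ '.' :: ys with no dot in xs
      set xs := cs.takeWhile (fun c => c ≠ '.') with hxs
      have hdropne : cs.dropWhile (fun c => c ≠ '.') ≠ [] := by
        intro h
        have h2 := List.dropWhile_eq_nil_iff.mp h '.' hdot
        simp at h2
      obtain ⟨a, ys, hdw⟩ : ∃ a ys, cs.dropWhile (fun c => c ≠ '.') = a :: ys := by
        cases h : cs.dropWhile (fun c => c ≠ '.') with
        | nil => exact absurd h hdropne
        | cons a t => exact ⟨a, t, rfl⟩
      have ha : a = '.' := by
        have := pvDropWhileHead hdw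
        simpa using this
      subst ha
      have hdec : cs = xs ++ '.' :: ys := by
        conv_lhs => rw [← List.takeWhile_append_dropWhile (p := fun c => decide (c ≠ '.')) (l := cs)]
        rw [hdw]
      have hxsnodot : ∀ x ∈ xs, x ≠ '.' := by
        intro x hx
        have := List.mem_takeWhile_imp hx
        simpa using this
      have hxsnn : xs ≠ [] := by
        intro h
        apply hpre
        rw [hdec, h, List.nil_append]
        exact ⟨ys, rfl⟩
      have hsplit : cs.splitOn '.' = xs :: ys.splitOn '.' := by
        rw [hdec]
        simpa [List.splitOn] using
          List.splitOnP_first (· == '.') xs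
            (by intro x hx; simpa using hxsnodot x hx) '.' (by simp) ys
      rw [hsplit] at hp
      rcases List.mem_cons.mp hp with hp | hp
      · exact hp ▸ hxsnn
      · -- recurse on ys
        have hyslen : ys.length ≤ m := by
          have hl : cs.length = xs.length + 1 + ys.length := by
            rw [hdec]
            simp only [List.length_append, List.length_cons]
            omega
          have hx1 : 1 ≤ xs.length := List.length_pos_iff.mpr hxsnn
          omega
        have hysne : ys ≠ [] := by
          intro h
          apply hsuf
          rw [hdec, h]
          exact ⟨xs, rfl⟩
        have hyspre : ¬ (['.'] <+: ys) := by
          rintro ⟨t, ht⟩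
          apply hinf
          exact ⟨xs, t, by rw [hdec, ← ht]; simp⟩
        have hyssuf : ¬ (['.'] <:+ ys) := by
          intro h
          apply hsuf
          exact h.trans ⟨xs ++ ['.'], by rw [hdec]; simp⟩
        have hysinf : ¬ (['.', '.'] <:+: ys) := by
          intro h
          apply hinf
          exact h.trans ⟨xs ++ ['.'], [], by rw [hdec]; simp⟩
        exact ih ys hyslen hysne hyspre hyssuf hysinf p hp
    · rw [pvSplitOn_no_dot cs hdot] at hp
      simp only [List.mem_singleton] at hp
      exact hp ▸ hne

-- ===== B-side lemmas: the scan's invariant =====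

-- over a dot-free block the scan only grows the segment counter
theorem pvLoopB_no_dot : ∀ (ys : List Char), '.' ∉ ys → ∀ (i : Nat) (ld : Option Nat) (sl : Nat),
    pvLoopB ys i ld sl = some (ld, sl + ys.length) := by
  intro ys
  induction ys with
  | nil => intro _ i ld sl; simp [pvLoopB]
  | cons c rest ih =>
    intro h i ld sl
    have hc : c ≠ '.' := fun he => h (he ▸ List.mem_cons_self)
    rw [pvLoopB, if_neg hc, ih (fun hm => h (List.mem_cons_of_mem _ hm))]
    simp only [List.length_cons, Option.some.injEq, Prod.mk.injEq]
    constructor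
    · trivial
    · omega

-- a successful scan of xs continues through an appended tail
theorem pvLoopB_append : ∀ (xs : List Char) (i : Nat) (ld : Option Nat) (sl : Nat)
    (ld' : Option Nat) (sl' : Nat) (ys : List Char),
    pvLoopB xs i ld sl = some (ld', sl') →
    pvLoopB (xs ++ ys) i ld sl = pvLoopB ys (i + xs.length) ld' sl' := by
  intro xs
  induction xs with
  | nil =>
    intro i ld sl ld' sl' ys h
    simp only [pvLoopB] at h
    cases h
    simp
  | cons c rest ih =>
    intro i ld sl ld' sl' ys h
    rw [pvLoopB] at h
    rw [List.cons_append, pvLoopB]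
    by_cases hc : c = '.'
    · rw [if_pos hc] at h ⊢
      by_cases hs : sl = 0
      · rw [if_pos hs] at h; exact absurd h (by simp)
      · rw [if_neg hs] at h ⊢
        rw [ih _ _ _ _ _ _ h]
        simp only [List.length_cons]
        congr 1
        omega
    · rw [if_neg hc] at h ⊢
      rw [ih _ _ _ _ _ _ h]
      simp only [List.length_cons]
      congr 1
      omega

-- on a valid reference p ++ '.' :: s (last dot at p.length) the scan returns that
-- index and the final segment's length
theorem pvLoopB_dot : ∀ (n : Nat) (p s : List Char), p.length ≤ n → '.' ∉ s →
    p ≠ [] → ¬ (['.'] <+: p) → ¬ (['.'] <:+ p) → ¬ (['.', '.'] <:+: p) →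
    pvLoopB (p ++ '.' :: s) 0 none 0 = some (some p.length, s.length) := by
  intro n
  induction n with
  | zero =>
    intro p s hlen _ hne _ _ _
    cases p with
    | nil => exact absurd rfl hne
    | cons a l => simp at hlen
  | succ m ih =>
    intro p s hlen hs hne hpre hsuf hinf
    by_cases hdot : '.' ∈ p
    · -- decompose p at ITS last dot: p = p2 ++ '.' :: s2, '.' ∉ s2
      have hdropne : p.reverse.dropWhile (fun c => c ≠ '.') ≠ [] := by
        intro h
        have h2 := List.dropWhile_eq_nil_iff.mp h '.' (List.mem_reverse.mpr hdot)
        simp at h2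
      obtain ⟨a, eRev, hdw⟩ : ∃ a t, p.reverse.dropWhile (fun c => c ≠ '.') = a :: t := by
        cases h : p.reverse.dropWhile (fun c => c ≠ '.') with
        | nil => exact absurd h hdropne
        | cons a t => exact ⟨a, t, rfl⟩
      have ha : a = '.' := by
        have := pvDropWhileHead hdw
        simpa using this
      subst ha
      set s2Rev := p.reverse.takeWhile (fun c => c ≠ '.') with hs2Rev
      have hdecRev : p.reverse = s2Rev ++ '.' :: eRev := by
        conv_lhs => rw [← List.takeWhile_append_dropWhile (p := fun c => decide (c ≠ '.')) (l := p.reverse)]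
        rw [hdw]
      set p2 := eRev.reverse with hp2
      set s2 := s2Rev.reverse with hs2
      have hdec : p = p2 ++ '.' :: s2 := by
        have h6 := congrArg List.reverse hdecRev
        simpa [List.reverse_append, List.append_assoc] using h6
      have hs2nodot : '.' ∉ s2 := by
        intro h
        have h7 : ('.' : Char) ∈ s2Rev := by simpa [hs2] using h
        have := List.mem_takeWhile_imp h7
        simp at this
      have hp2ne : p2 ≠ [] := by
        intro h
        apply hpre
        rw [hdec, h, List.nil_append]
        exact ⟨s2, rfl⟩
      have hs2ne : s2 ≠ [] := by
        intro h
        apply hsuf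
        rw [hdec, h]
        exact ⟨p2, rfl⟩
      have hp2pre : ¬ (['.'] <+: p2) := by
        rintro ⟨t, ht⟩
        apply hpre
        rw [hdec, ← ht]
        exact ⟨t ++ '.' :: s2, by simp⟩
      have hp2suf : ¬ (['.'] <:+ p2) := by
        rintro ⟨t, ht⟩
        apply hinf
        exact ⟨t, s2, by rw [hdec, ← ht]; simp⟩
      have hp2inf : ¬ (['.', '.'] <:+: p2) := by
        intro h
        apply hinf
        exact h.trans ⟨[], '.' :: s2, by rw [hdec]; simp⟩
      have hp2len : p2.length ≤ m := by
        have hl : p.length = p2.length + 1 + s2.length := by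
          rw [hdec]; simp only [List.length_append, List.length_cons]; omega
        have hx1 : 1 ≤ s2.length := List.length_pos_iff.mpr hs2ne
        omega
      have hIH : pvLoopB p 0 none 0 = some (some p2.length, s2.length) := by
        rw [hdec]; exact ih p2 s2 hp2len hs2nodot hp2ne hp2pre hp2suf hp2inf
      rw [pvLoopB_append p 0 none 0 _ _ ('.' :: s) hIH]
      rw [pvLoopB, if_pos rfl, if_neg (by simpa using List.length_pos_iff.mpr hs2ne |>.ne')]
      rw [pvLoopB_no_dot s hs]
      simp
    · -- p dot-free: the scan crosses p, then the dot, then s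
      have h1 : pvLoopB p 0 none 0 = some (none, p.length) := by
        simpa using pvLoopB_no_dot p hdot 0 none 0
      rw [pvLoopB_append p 0 none 0 _ _ ('.' :: s) h1]
      rw [pvLoopB, if_pos rfl, if_neg (by simpa using List.length_pos_iff.mpr hne |>.ne')]
      rw [pvLoopB_no_dot s hs]
      simp

-- the chars-level equivalence
theorem pvSplit_eq (cs : List Char) (hne : cs ≠ [])
    (h2 : PySem.Chars.startswith cs ['.'] = false)
    (h3 : PySem.Chars.endswith cs ['.'] = false)
    (h4 : PySem.Chars.isIn ['.', '.'] cs = false) :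
    pvSplitA cs = pvSplitB cs := by
  have hIsE : cs.isEmpty = false := by simpa using hne
  have hpre : ¬ (['.'] <+: cs) := by
    intro h
    rw [(PySem.Chars.startswith_iff _ _).mpr h] at h2
    exact Bool.true_eq_false.mp h2
  have hsuf : ¬ (['.'] <:+ cs) := by
    intro h
    rw [(PySem.Chars.endswith_iff _ _).mpr h] at h3
    exact Bool.true_eq_false.mp h3
  have hinf : ¬ (['.', '.'] <:+: cs) := by
    intro h
    rw [(PySem.Chars.isIn_iff_infix _ _).mpr h] at h4
    exact Bool.true_eq_false.mp h4
  by_cases hdot : '.' ∈ cs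
  · -- decompose cs at the LAST dot
    have hdropne : cs.reverse.dropWhile (fun c => c ≠ '.') ≠ [] := by
      intro h
      have h5 := List.dropWhile_eq_nil_iff.mp h '.' (List.mem_reverse.mpr hdot)
      simp at h5
    obtain ⟨a, eRev, hdw⟩ : ∃ a t, cs.reverse.dropWhile (fun c => c ≠ '.') = a :: t := by
      cases h : cs.reverse.dropWhile (fun c => c ≠ '.') with
      | nil => exact absurd h hdropne
      | cons a t => exact ⟨a, t, rfl⟩
    have ha : a = '.' := by
      have := pvDropWhileHead hdw
      simpa using this
    subst ha
    set afterRev := cs.reverse.takeWhile (fun c => c ≠ '.') with hafterRev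
    have hdecRev : cs.reverse = afterRev ++ '.' :: eRev := by
      conv_lhs => rw [← List.takeWhile_append_dropWhile (p := fun c => decide (c ≠ '.')) (l := cs.reverse)]
      rw [hdw]
    set pre := eRev.reverse with hpreDef
    set suf := afterRev.reverse with hsufDef
    have hdec : cs = pre ++ '.' :: suf := by
      have h6 := congrArg List.reverse hdecRev
      simpa [List.reverse_append, List.append_assoc] using h6
    have hsufnodot : '.' ∉ suf := by
      intro h
      have h7 : ('.' : Char) ∈ afterRev := by simpa [hsufDef] using h
      have := List.mem_takeWhile_imp h7
      simp at this
    have hprene : pre ≠ [] := by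
      intro h
      apply hpre
      rw [hdec, h, List.nil_append]
      exact ⟨suf, rfl⟩
    have hsufne : suf ≠ [] := by
      intro h
      apply hsuf
      rw [hdec, h]
      exact ⟨pre, rfl⟩
    have hprepre : ¬ (['.'] <+: pre) := by
      rintro ⟨t, ht⟩
      apply hpre
      rw [hdec, ← ht]
      exact ⟨t ++ '.' :: suf, by simp⟩
    have hpresuf : ¬ (['.'] <:+ pre) := by
      rintro ⟨t, ht⟩
      apply hinf
      exact ⟨t, suf, by rw [hdec, ← ht]; simp⟩
    have hpreinf : ¬ (['.', '.'] <:+: pre) := by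
      intro h
      apply hinf
      exact h.trans ⟨[], '.' :: suf, by rw [hdec]; simp⟩
    -- A's value
    have hparts : PySem.Chars.splitOn cs ['.'] = pre.splitOn '.' ++ [suf] := by
      rw [pvSplitOn_eq]
      conv_lhs => rw [hdec]
      rw [pvSplitOn_append, pvSplitOn_no_dot suf hsufnodot]
    have hallne : ∀ p ∈ cs.splitOn '.', p ≠ [] :=
      pvParts_ne_nil cs.length cs le_rfl hne hpre hsuf hinf
    have hany : (PySem.Chars.splitOn cs ['.']).any List.isEmpty = false := by
      rw [pvSplitOn_eq]
      simp only [List.any_eq_false]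
      intro p hp
      simpa using hallne p hp
    have hsplitne : pre.splitOn '.' ≠ [] := List.splitOnP_ne_nil _ pre
    have hlen : ((PySem.Chars.splitOn cs ['.']).length == 1) = false := by
      rw [hparts]
      have h8 : 1 ≤ (pre.splitOn '.').length := List.length_pos_iff.mpr hsplitne
      simp only [List.length_append, List.length_cons, List.length_nil, beq_eq_false_iff_ne, ne_eq]
      omega
    have hjoin : PySem.Chars.join ['.'] ((PySem.Chars.splitOn cs ['.']).dropLast) = pre := by
      rw [hparts, List.dropLast_concat, PySem.Chars.join]
      exact List.intercalate_splitOn pre '.'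
    have hlast : (PySem.Chars.splitOn cs ['.']).getLastD [] = suf := by
      rw [hparts]
      simp
    have hA : pvSplitA cs = (some (String.ofList pre), String.ofList suf) := by
      rw [pvSplitA, if_neg (by simp [hIsE])]
      simp only [hany, Bool.false_eq_true, if_false, hlen]
      rw [hjoin, hlast]
    -- B's value
    have hloop : pvLoopB cs 0 none 0 = some (some pre.length, suf.length) := by
      rw [hdec]
      exact pvLoopB_dot pre.length pre suf le_rfl hsufnodot hprene hprepre hpresuf hpreinf
    have htake : cs.take pre.length = pre := by
      rw [hdec]; exact List.take_left
    have hdrop : cs.drop (pre.length + 1) = suf := by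
      rw [hdec]
      simp
    have hB : pvSplitB cs = (some (String.ofList pre), String.ofList suf) := by
      rw [pvSplitB, if_neg (by simp [hIsE]), hloop]
      simp only
      rw [if_neg (by simpa using List.length_pos_iff.mpr hsufne |>.ne')]
      rw [htake, hdrop]
    rw [hA, hB]
  · -- no dot: both return (none, cs)
    have hA : pvSplitA cs = (none, String.ofList cs) := by
      rw [pvSplitA, if_neg (by simp [hIsE])]
      have hparts : PySem.Chars.splitOn cs ['.'] = [cs] := by
        rw [pvSplitOn_eq, pvSplitOn_no_dot cs hdot]
      rw [hparts]
      simp [hIsE]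
    have hB : pvSplitB cs = (none, String.ofList cs) := by
      rw [pvSplitB, if_neg (by simp [hIsE])]
      rw [show pvLoopB cs 0 none 0 = some (none, cs.length) by
        simpa using pvLoopB_no_dot cs hdot 0 none 0]
      simp only
      rw [if_neg (by simpa using List.length_pos_iff.mpr hne |>.ne')]
    rw [hA, hB]

-- ===== VERDICT (by name: the statement is the Claim_ definition above) =====
theorem split_table_reference_py_spec : Claim_equal_split_table_reference_py := by
  intro name _ hPre
  obtain ⟨h1, h2, h3, h4⟩ := hPre
  unfold Spec_split_table_reference_py split_table_reference_py split_table_reference_py_alt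
  exact pvSplit_eq _ h1 h2 h3 h4
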